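-- pv_equiv track=rewrite | github.com/Rick-Wilson/Baker-Bridge | Tools/bb_fill.py | format_hand
-- ===== SOURCE A (Python) =====
-- from collections import defaultdict
--
-- SUITS = ['S', 'H', 'D', 'C']
--
-- RANKS = 'AKQJT98765432'
--
-- def format_hand(cards):
--     suit_map = defaultdict(list)
--     for card in cards:
--         suit, rank = card[0], card[1:]
--         suit_map[suit].append(rank)
--     for suit in suit_map:
--         suit_map[suit] = sorted(suit_map[suit], key=lambda r: RANKS.index(r))
--     return ' '.join(f"{s}:{''.join(suit_map[s])}" for s in SUITS)
-- ===== SOURCE B (Python) =====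
-- SUITS = ['S', 'H', 'D', 'C']
--
-- RANKS = 'AKQJT98765432'
--
-- def format_hand(cards):
--     # Distribution instead of comparison sort: precompute each card's rank
--     # position once, then read the 13 rank buckets per suit in order.
--     split = [(card[0], card[1:], RANKS.index(card[1:])) for card in cards]
--     parts = []
--     for s in SUITS:
--         ranks = ''.join(''.join(r for suit, r, p in split if suit == s and p == pos)
--                         for pos in range(13))
--         parts.append(f"{s}:{ranks}")
--     return ' '.join(parts)
-- ===== Notes on version B (the rewrite author's own statement) =====
-- stated objective: alternative
-- what changed: Replaces A's defaultdict grouping plus per-suit stable comparison sort with key=RANKS.index by a single precomputation of each card's rank position followed by a distribution read over the 13 fixed rank positions per suit (no dict, no sort).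
import Mathlib
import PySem

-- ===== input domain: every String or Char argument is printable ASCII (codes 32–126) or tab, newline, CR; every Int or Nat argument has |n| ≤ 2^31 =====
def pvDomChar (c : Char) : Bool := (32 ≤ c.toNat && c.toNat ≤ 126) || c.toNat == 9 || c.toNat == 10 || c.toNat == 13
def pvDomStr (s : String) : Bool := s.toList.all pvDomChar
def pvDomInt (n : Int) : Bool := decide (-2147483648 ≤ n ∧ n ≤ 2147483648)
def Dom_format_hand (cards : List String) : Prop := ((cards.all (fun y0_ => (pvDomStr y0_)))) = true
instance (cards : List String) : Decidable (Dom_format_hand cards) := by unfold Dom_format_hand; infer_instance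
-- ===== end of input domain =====

-- B replaces A's per-suit comparison sort (key=RANKS.index) by a distribution over the 13
-- fixed rank positions read back in index order; the RETURN values agree on Pre_.

def RANKS : String := "AKQJT98765432"
def SUITS : List String := ["S", "H", "D", "C"]

-- card[0] as a 1-character string (card nonempty under Pre_), card[1:], and RANKS.index(r)
def suitF (card : String) : String := String.ofList (card.toList.take 1)
def rankF (card : String) : String := String.ofList (card.toList.drop 1)
def keyA (r : String) : Int := PySem.Str.find RANKS r  -- RANKS.index(r); Pre_ keeps it ≥ 0

-- ===== PORT A =====
def format_hand (cards : List String) : String :=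
  let suit_map : PySem.Dict String (List String) :=
    cards.foldl (fun d card => d.modify (suitF card) [] (fun l => l ++ [rankF card]))
      PySem.Dict.empty
  let suit_map2 :=
    suit_map.keys.foldl (fun d suit => d.insert suit (PySem.List.sorted (d.getD suit []) keyA))
      suit_map
  PySem.Str.join " " (SUITS.map (fun s => s ++ ":" ++ PySem.Str.join "" (suit_map2.getD s [])))

-- ===== PORT B =====
def format_hand_alt (cards : List String) : String :=
  let split := cards.map (fun card => (suitF card, rankF card, keyA (rankF card)))
  let parts := SUITS.map (fun s =>
    s ++ ":" ++ PySem.Str.join "" ((PySem.List.pyRange 0 13).map (fun pos =>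
      PySem.Str.join ""
        ((split.filter (fun t => t.1 == s && t.2.2 == pos)).map (fun t => t.2.1)))))
  PySem.Str.join " " parts

-- ===== PRECONDITION & SPEC =====
-- Pre_ excludes exactly the inputs where the Python A raises: an empty card string
-- (IndexError at card[0]) or a rank card[1:] that is not a substring of RANKS
-- (ValueError from RANKS.index inside the sort key).
def Pre_format_hand (cards : List String) : Prop :=
  ∀ card ∈ cards, card.toList ≠ [] ∧ (card.toList.drop 1) <:+: RANKS.toList
instance (cards : List String) : Decidable (Pre_format_hand cards) := by
  unfold Pre_format_hand; infer_instance

def pvWitness_format_hand : List String := ["SA", "SK", "H7", "HT", "D2", "CQ", "CJ", "S"]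

def Spec_format_hand (cards : List String) (out : String) : Prop := out = format_hand_alt cards
instance (cards : List String) (out : String) : Decidable (Spec_format_hand cards out) := by
  unfold Spec_format_hand; infer_instance

-- ===== CLAIM (what is proved, stated in full; the proofs are below) =====
def Claim_equal_format_hand : Prop := ∀ (cards : List String), Dom_format_hand cards →
  Pre_format_hand cards → Spec_format_hand cards (format_hand cards)

-- ===== LEMMAS AND PROOFS =====

-- inserting an element between a prefix it does not go before and a suffix it goes before
theorem insertBy_middle {α : Type} (before : α → α → Bool) (x : α) (L R : List α)
    (hL : ∀ y ∈ L, before x y = false) (hR : ∀ y ∈ R, before x y = true) :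
    PySem.List.insertBy before x (L ++ R) = L ++ x :: R := by
  induction L with
  | nil =>
    cases R with
    | nil => rfl
    | cons y ys => simp [PySem.List.insertBy, hR y (by simp)]
  | cons z L' ih =>
    simp [PySem.List.insertBy, hL z (by simp)]
    exact ih (fun y hy => hL y (by simp [hy]))

theorem find_go_cons (sub : List Char) (c : Char) (t : List Char) (k : Nat) :
    PySem.Chars.find.go sub (c :: t) k
    = if sub.isPrefixOf (c :: t) then (k : Int) else PySem.Chars.find.go sub t (k + 1) := rfl

-- bounds on the index returned by str.find's worker when it does not fail
theorem find_go_bounds (sub : List Char) (hsub : sub ≠ []) :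
    ∀ (s : List Char) (k : Nat), PySem.Chars.find.go sub s k ≠ -1 →
      (k : Int) ≤ PySem.Chars.find.go sub s k ∧
      PySem.Chars.find.go sub s k < (k : Int) + s.length := by
  intro s
  induction s with
  | nil => intro k h; simp [PySem.Chars.find.go, List.isEmpty_iff, hsub] at h
  | cons c t ih =>
    intro k h
    rw [find_go_cons] at h ⊢
    by_cases hp : sub.isPrefixOf (c :: t)
    · simp [hp]
    · rw [if_neg hp] at h ⊢
      have := ih (k + 1) h
      push_cast at this ⊢
      simp only [List.length_cons] at *
      push_cast
      omega

theorem key_bounds (card : String) (h2 : (card.toList.drop 1) <:+: RANKS.toList) :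
    0 ≤ keyA (rankF card) ∧ keyA (rankF card) < 13 := by
  have hk : keyA (rankF card) = PySem.Chars.find RANKS.toList (card.toList.drop 1) := by
    simp [keyA, PySem.Str.find, rankF, String.toList_ofList]
  rw [hk]
  by_cases hs : card.toList.drop 1 = []
  · rw [hs]; decide
  · have hne : PySem.Chars.find RANKS.toList (card.toList.drop 1) ≠ -1 := by
      simp only [ne_eq, PySem.Chars.find_eq_neg_one_iff, not_not]; exact h2
    have := find_go_bounds _ hs RANKS.toList 0 hne
    have hlen : (RANKS.toList.length : Int) = 13 := by decide
    unfold PySem.Chars.find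
    unfold PySem.Chars.find at this hne
    omega

-- A's grouping dict, looked up
theorem smA_getD (cards : List String) (s : String) :
    (cards.foldl (fun d card => d.modify (suitF card) [] (fun l => l ++ [rankF card]))
      PySem.Dict.empty).getD s []
    = (cards.filter (fun c => suitF c == s)).map rankF := by
  rw [← List.foldl_map (f := fun c => (suitF c, rankF c))
        (g := fun (d : PySem.Dict String (List String)) p => d.modify p.1 [] (fun x => x ++ [p.2]))]
  rw [PySem.Dict.getD_foldl_modify_append]
  simp [List.filter_map, Function.comp_def]

-- A's second loop: each key's list is replaced by its sorted version
theorem sortkeys_getD (kl : List String) (d : PySem.Dict String (List String))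
    (hnd : kl.Nodup) (s : String) :
    (kl.foldl (fun d suit => d.insert suit (PySem.List.sorted (d.getD suit []) keyA)) d).getD s []
    = if s ∈ kl then PySem.List.sorted (d.getD s []) keyA else d.getD s [] := by
  induction kl generalizing d with
  | nil => simp
  | cons k t ih =>
    simp only [List.foldl_cons]
    rw [ih _ hnd.of_cons]
    by_cases hst : s ∈ t
    · have hsk : s ≠ k := by rintro rfl; exact (List.nodup_cons.mp hnd).1 hst
      simp [hst, hsk, PySem.Dict.getD_insert]
    · by_cases hsk : s = k
      · subst hsk; simp [hst]
      · simp [hst, hsk, PySem.Dict.getD_insert]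

-- the stable sort by a key with values in [0, 13) is the concatenation of the 13 buckets
theorem sorted_eq_buckets (rs : List String)
    (h : ∀ r ∈ rs, 0 ≤ keyA r ∧ keyA r < 13) :
    PySem.List.sorted rs keyA
    = ((List.range 13).map (fun (p : Nat) => rs.filter (fun r => keyA r == (p : Int)))).flatten := by
  induction rs using List.reverseRecOn with
  | nil => simp [PySem.List.sorted_eq_foldl_insertBy]
  | append_singleton rs x ih =>
    have hx := h x (by simp)
    have hrs : ∀ r ∈ rs, 0 ≤ keyA r ∧ keyA r < 13 := fun r hr => h r (by simp [hr])
    have hstep : PySem.List.sorted (rs ++ [x]) keyA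
        = PySem.List.insertBy (fun a b => decide (keyA a < keyA b)) x (PySem.List.sorted rs keyA) := by
      rw [PySem.List.sorted_eq_foldl_insertBy, PySem.List.sorted_eq_foldl_insertBy,
        List.foldl_append]
      rfl
    rw [hstep, ih hrs]
    set p₀ : Nat := (keyA x).toNat with hp₀
    have hkx : keyA x = (p₀ : Int) := by omega
    have hp₀13 : p₀ < 13 := by omega
    have hsplit : (13 : Nat) = (p₀ + 1) + (12 - p₀) := by omega
    rw [hsplit, List.range_add]
    set B : Nat → List String := fun (p : Nat) => rs.filter (fun r => keyA r == (p : Int)) with hB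
    set B' : Nat → List String :=
      fun (p : Nat) => (rs ++ [x]).filter (fun r => keyA r == (p : Int)) with hB'
    have memB : ∀ p y, y ∈ B p → keyA y = (p : Int) := by
      intro p y hy
      rw [hB] at hy
      simp only [List.mem_filter, beq_iff_eq] at hy
      exact hy.2
    rw [List.map_append, List.flatten_append]
    have hL : ∀ y ∈ (List.map B (List.range (p₀+1))).flatten,
        (fun a b => decide (keyA a < keyA b)) x y = false := by
      intro y hy
      simp only [List.mem_flatten, List.mem_map, List.mem_range] at hy
      obtain ⟨l, ⟨p, hp, rfl⟩, hyl⟩ := hy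
      have := memB p y hyl
      simp only [decide_eq_false_iff_not, not_lt, hkx, this]
      exact_mod_cast Nat.lt_succ_iff.mp hp
    have hR : ∀ y ∈ (List.map B (List.map (fun i => (p₀+1) + i) (List.range (12 - p₀)))).flatten,
        (fun a b => decide (keyA a < keyA b)) x y = true := by
      intro y hy
      simp only [List.mem_flatten, List.mem_map] at hy
      obtain ⟨l, ⟨p, ⟨i, hi, rfl⟩, rfl⟩, hyl⟩ := hy
      have := memB _ y hyl
      simp only [decide_eq_true_eq, hkx, this]
      push_cast
      omega
    rw [insertBy_middle _ x _ _ hL hR]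
    have hB'eq : ∀ p : Nat, B' p = B p ++ (if keyA x == (p : Int) then [x] else []) := by
      intro p
      show (rs ++ [x]).filter (fun r => keyA r == (p : Int))
        = rs.filter (fun r => keyA r == (p : Int)) ++ _
      rw [List.filter_append]
      congr 1
      by_cases hc : keyA x = (p : Int)
      · have hb : (keyA x == (p : Int)) = true := by simpa using hc
        simp [List.filter, hb]
      · have hb : (keyA x == (p : Int)) = false := by simpa using hc
        simp [List.filter, hb]
    have hB'ne : ∀ p : Nat, p ≠ p₀ → B' p = B p := by
      intro p hp
      rw [hB'eq p, hkx]
      have : ((p₀ : Int) == (p : Int)) = false := by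
        simp only [beq_eq_false_iff_ne, ne_eq]
        exact_mod_cast fun hc => hp (by exact_mod_cast hc.symm)
      rw [this]
      simp
    have hB'p₀ : B' p₀ = B p₀ ++ [x] := by rw [hB'eq p₀, hkx]; simp
    rw [List.map_append, List.flatten_append]
    have e1 : List.map B' (List.range (p₀+1)) =
        List.map B (List.range p₀) ++ [B p₀ ++ [x]] := by
      rw [List.range_succ, List.map_append]
      congr 1
      · exact List.map_congr_left (fun p hp => hB'ne p (by simp at hp; omega))
      · simp [hB'p₀]
    have e2 : List.map B' (List.map (fun i => (p₀+1) + i) (List.range (12 - p₀)))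
        = List.map B (List.map (fun i => (p₀+1) + i) (List.range (12 - p₀))) := by
      refine List.map_congr_left (fun p hp => hB'ne p ?_)
      simp only [List.mem_map, List.mem_range] at hp
      obtain ⟨i, hi, rfl⟩ := hp
      omega
    rw [e1, e2, List.flatten_append]
    simp [List.range_succ]

-- ''.join with empty separator is concatenation
theorem join_nil (ll : List (List Char)) : PySem.Chars.join [] ll = ll.flatten := by
  induction ll with
  | nil => rfl
  | cons h t ih => cases t <;> simp_all [PySem.Chars.join, List.intercalate]

theorem str_join_join (ll : List (List String)) :
    PySem.Str.join "" ll.flatten = PySem.Str.join "" (ll.map (PySem.Str.join "")) := by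
  have htl : ("" : String).toList = [] := rfl
  simp only [PySem.Str.join, htl, join_nil]
  congr 1
  rw [List.map_flatten, List.flatten_flatten, List.map_map, List.map_map]
  congr 1
  refine List.map_congr_left (fun l _ => ?_)
  simp [join_nil]

-- the per-suit strings agree
theorem per_suit (cards : List String) (hpre : Pre_format_hand cards) (s : String) :
    PySem.Str.join "" (PySem.List.sorted ((cards.filter (fun c => suitF c == s)).map rankF) keyA)
    = PySem.Str.join "" ((PySem.List.pyRange 0 13).map (fun pos =>
        PySem.Str.join ""
          (((cards.map (fun card => (suitF card, rankF card, keyA (rankF card)))).filter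
              (fun t => t.1 == s && t.2.2 == pos)).map (fun t => t.2.1)))) := by
  have hrange : PySem.List.pyRange 0 13 = (List.range 13).map (fun (k : Nat) => (k : Int)) := by
    decide
  rw [hrange, List.map_map]
  have hkeys : ∀ r ∈ (cards.filter (fun c => suitF c == s)).map rankF,
      0 ≤ keyA r ∧ keyA r < 13 := by
    intro r hr
    simp only [List.mem_map, List.mem_filter] at hr
    obtain ⟨c, ⟨hc, _⟩, rfl⟩ := hr
    exact key_bounds c (hpre c hc).2
  rw [sorted_eq_buckets _ hkeys, str_join_join, List.map_map]
  refine congrArg _ (List.map_congr_left (fun p _ => ?_))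
  show PySem.Str.join "" _ = PySem.Str.join "" _
  refine congrArg _ ?_
  simp only [List.filter_map, List.map_map, List.filter_filter, Function.comp_def]
  rw [List.filter_congr
    (fun c _ => Bool.and_comm (keyA (rankF c) == (p : Int)) (suitF c == s))]

-- ===== VERDICT (by name: the statement is the Claim_ definition above) =====
theorem format_hand_spec : Claim_equal_format_hand := by
  intro cards _ hpre
  unfold Spec_format_hand format_hand format_hand_alt
  simp only []
  have hnd : (cards.foldl
      (fun d card => d.modify (suitF card) [] (fun l => l ++ [rankF card]))
      PySem.Dict.empty).keys.Nodup :=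
    PySem.Dict.nodup_keys_foldl_modify_key cards suitF [] _ _ PySem.Dict.nodup_keys_empty
  refine congrArg _ (List.map_congr_left (fun s _ => ?_))
  refine congrArg _ ?_
  rw [sortkeys_getD _ _ hnd s]
  have hgd := smA_getD cards s
  split_ifs with hmem
  · rw [hgd]; exact per_suit cards hpre s
  · have hcont : (cards.foldl
        (fun d card => d.modify (suitF card) [] (fun l => l ++ [rankF card]))
        PySem.Dict.empty).contains s = false := by
      rw [← Bool.not_eq_true, PySem.Dict.contains_iff_mem_keys]
      exact hmem
    rw [PySem.Dict.getD_of_not_contains _ _ hcont] at hgd ⊢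
    have hps := per_suit cards hpre s
    rw [← hgd] at hps
    exact hps
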